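-- pv_equiv track=rewrite | github.com/RavenHex1296/assignment-problems | recursive_sequence.py | first_n_terms
-- ===== SOURCE A (Python) =====
-- def first_n_terms(n):
--     assert n > 0, "Input must be positive"
--     sequence = []
--
--     for element in range(1, n):
--         if element == 1:
--             preceding_term = 5
--             sequence.append(5)
--
--         sequence.append(3 * preceding_term - 4)
--         preceding_term = 3 * preceding_term - 4
--
--     return sequence
-- ===== SOURCE B (Python) =====
-- def first_n_terms(n):
--     assert n > 0, "Input must be positive"
--     # closed form of the recurrence: a(k) = 3**k + 2
--     terms = []
--     power = 3
--     for _ in range(n):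
--         terms.append(power + 2)
--         power *= 3
--     return terms
-- ===== Notes on version B (the rewrite author's own statement) =====
-- stated objective: simpler
-- what changed: Uses the closed-form identity that each term is a power of three plus a constant, maintaining the power incrementally, instead of iterating the affine recurrence with a carried preceding term and a first-iteration branch.
-- intended difference: For n == 1 A returns [] (its double-append loop runs one fewer time than there are terms, so the first call yields nothing) while B returns [5], the intended first term of the sequence. — e.g. on first_n_terms(1): A returns [], B returns [5]
import Mathlib
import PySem

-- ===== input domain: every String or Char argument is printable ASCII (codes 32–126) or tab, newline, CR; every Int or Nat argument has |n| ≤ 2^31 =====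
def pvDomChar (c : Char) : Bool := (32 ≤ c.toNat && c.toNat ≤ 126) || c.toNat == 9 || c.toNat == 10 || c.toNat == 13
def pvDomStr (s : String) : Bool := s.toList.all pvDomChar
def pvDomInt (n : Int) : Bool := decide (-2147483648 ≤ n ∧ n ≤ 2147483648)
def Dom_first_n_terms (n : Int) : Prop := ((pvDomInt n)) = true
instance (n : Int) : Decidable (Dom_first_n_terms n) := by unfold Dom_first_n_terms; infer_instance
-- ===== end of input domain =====

-- B computes each term by the closed form a(k)=3^k+2 instead of iterating the recurrence;
-- at n = 1 A returns [] (loop off-by-one) while B returns [5] (intended difference, see D_).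

-- ===== PORT A =====
-- preceding_term is unassigned before the loop in Python; 0 is a placeholder never read,
-- since the first iteration (element = 1) always assigns it before any read.
def first_n_terms (n : Int) : List Int :=
  ((PySem.List.pyRange 1 n 1).foldl
    (fun (st : List Int × Int) element =>
      let st := if element == 1 then (st.1 ++ [(5 : Int)], (5 : Int)) else st
      (st.1 ++ [3 * st.2 - 4], 3 * st.2 - 4))
    ([], 0)).1

-- ===== PORT B =====
def first_n_terms_alt (n : Int) : List Int :=
  ((PySem.List.pyRange 0 n 1).foldl
    (fun (st : List Int × Int) _ => (st.1 ++ [st.2 + 2], st.2 * 3))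
    ([], 3)).1

-- ===== PRECONDITION & SPEC =====
-- A's assert raises AssertionError for n ≤ 0.
def Pre_first_n_terms (n : Int) : Prop := 0 < n
instance (n : Int) : Decidable (Pre_first_n_terms n) := by unfold Pre_first_n_terms; infer_instance
def pvWitness_first_n_terms : Int := 3

-- For n == 1 A returns [] (its loop runs n-1 times appending two terms on the first pass),
-- while B returns [5], the intended first term of the sequence.
def D_first_n_terms (n : Int) : Prop := n = 1
instance (n : Int) : Decidable (D_first_n_terms n) := by unfold D_first_n_terms; infer_instance

def Spec_first_n_terms (n : Int) (out : List Int) : Prop := ¬ D_first_n_terms n → out = first_n_terms_alt n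
instance (n : Int) (out : List Int) : Decidable (Spec_first_n_terms n out) := by unfold Spec_first_n_terms; infer_instance

def pvDiffWitness_first_n_terms : Int := 1
def pvDiffWitnessOut_first_n_terms : (List Int) × (List Int) := ([], [5])

-- ===== CLAIM =====
def Claim_unchanged_first_n_terms : Prop := ∀ (n : Int), Dom_first_n_terms n → Pre_first_n_terms n → Spec_first_n_terms n (first_n_terms n)
def Claim_changed_first_n_terms : Prop := Dom_first_n_terms (pvDiffWitness_first_n_terms) ∧ Pre_first_n_terms (pvDiffWitness_first_n_terms) ∧ D_first_n_terms (pvDiffWitness_first_n_terms) ∧ first_n_terms (pvDiffWitness_first_n_terms) = pvDiffWitnessOut_first_n_terms.1 ∧ first_n_terms_alt (pvDiffWitness_first_n_terms) = pvDiffWitnessOut_first_n_terms.2 ∧ pvDiffWitnessOut_first_n_terms.1 ≠ pvDiffWitnessOut_first_n_terms.2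
def Claim_exact_first_n_terms : Prop := ∀ (n : Int), Dom_first_n_terms n → Pre_first_n_terms n → D_first_n_terms n → first_n_terms n ≠ first_n_terms_alt n

-- ===== LEMMAS AND PROOFS =====
def pvG : Int → Int := fun k => 3 ^ k.toNat + 2

theorem pvG_step (k : Int) (hk : 0 ≤ k) : 3 * pvG k - 4 = pvG (k + 1) := by
  unfold pvG
  have : (k + 1).toNat = k.toNat + 1 := by omega
  rw [this, pow_succ]
  ring

theorem pv_fold_inv (m : Nat) :
    ((PySem.List.pyRange 2 (2 + m) 1).foldl
      (fun (st : List Int × Int) element =>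
        let st := if element == 1 then (st.1 ++ [(5 : Int)], (5 : Int)) else st
        (st.1 ++ [3 * st.2 - 4], 3 * st.2 - 4))
      ([5, 11], 11))
    = ((PySem.List.pyRange 1 (2 + m + 1) 1).map pvG, pvG (2 + m)) := by
  induction m with
  | zero =>
    simp only [Nat.cast_zero, add_zero]
    rw [PySem.List.pyRange_one_eq_nil (by norm_num)]
    rw [show ((2 : Int) + 1) = 3 from rfl]
    decide
  | succ m ih =>
    have h1 : ((2 : Int) + (↑(m + 1))) = (2 + ↑m) + 1 := by push_cast; ring
    rw [h1, PySem.List.pyRange_one_succ_right (by omega), List.foldl_append, ih]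
    simp only [List.foldl_cons, List.foldl_nil]
    have hne : ((2 : Int) + ↑m == 1) = false := by
      rw [beq_eq_false_iff_ne]; omega
    rw [hne]
    simp only [Bool.false_eq_true, if_false]
    have h2 : 3 * pvG (2 + ↑m) - 4 = pvG (2 + ↑m + 1) := pvG_step (2 + (m : Int)) (by positivity)
    rw [h2, show ((2 : Int) + ↑m + 1 + 1) = (2 + ↑m + 1) + 1 from by ring,
      PySem.List.pyRange_one_succ_right (show (1 : Int) ≤ 2 + ↑m + 1 by omega),
      PySem.List.pyRange_one_succ_right (show (1 : Int) ≤ 2 + ↑m by omega)]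
    simp [List.map_append, List.append_assoc]

theorem pvB_inv (m : Nat) :
    ((PySem.List.pyRange 0 m 1).foldl
      (fun (st : List Int × Int) _ => (st.1 ++ [st.2 + 2], st.2 * 3))
      ([], 3))
    = ((PySem.List.pyRange 1 (m + 1) 1).map pvG, 3 ^ (m + 1)) := by
  induction m with
  | zero => decide
  | succ m ih =>
    have h1 : ((m + 1 : Nat) : Int) = (m : Int) + 1 := by push_cast; ring
    rw [h1, PySem.List.pyRange_one_succ_right (show (0 : Int) ≤ ↑m by positivity),
      List.foldl_append, ih]
    simp only [List.foldl_cons, List.foldl_nil]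
    rw [show ((m : Int) + 1 + 1) = ((m : Int) + 1) + 1 from by ring,
      PySem.List.pyRange_one_succ_right (show (1 : Int) ≤ ↑m + 1 by omega)]
    rw [Prod.mk.injEq]
    constructor
    · rw [List.map_append]
      simp only [List.map_cons, List.map_nil]
      unfold pvG
      rw [show ((m : Int) + 1).toNat = m + 1 from by omega]
    · rw [pow_succ]
      ring

theorem first_n_terms_alt_eq (n : Int) (hn : 1 ≤ n) :
    first_n_terms_alt n = (PySem.List.pyRange 1 (n + 1) 1).map pvG := by
  unfold first_n_terms_alt
  obtain ⟨m, hm⟩ : ∃ m : Nat, n = (m : Int) := ⟨n.toNat, by omega⟩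
  subst hm
  rw [pvB_inv m]

theorem first_n_terms_eq (n : Int) (hn : 2 ≤ n) :
    first_n_terms n = first_n_terms_alt n := by
  rw [first_n_terms_alt_eq n (by omega)]
  unfold first_n_terms
  obtain ⟨m, hm⟩ : ∃ m : Nat, n = 2 + (m : Int) := ⟨(n - 2).toNat, by omega⟩
  subst hm
  rw [PySem.List.pyRange_one_cons (by omega), List.foldl_cons]
  show ((PySem.List.pyRange (1 + 1) (2 + (m : Int)) 1).foldl
      (fun (st : List Int × Int) element =>
        let st := if element == 1 then (st.1 ++ [(5 : Int)], (5 : Int)) else st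
        (st.1 ++ [3 * st.2 - 4], 3 * st.2 - 4))
      ([5, 11], 11)).1 = List.map pvG (PySem.List.pyRange 1 (2 + ↑m + 1) 1)
  rw [show (1 : Int) + 1 = 2 from rfl, pv_fold_inv m]

-- ===== VERDICT =====
theorem first_n_terms_spec : Claim_unchanged_first_n_terms := by
  intro n _ hpre hd
  unfold Pre_first_n_terms at hpre
  unfold D_first_n_terms at hd
  exact first_n_terms_eq n (by omega)

theorem first_n_terms_changed : Claim_changed_first_n_terms := by
  unfold Claim_changed_first_n_terms; decide

theorem first_n_terms_tight : Claim_exact_first_n_terms := by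
  intro n _ _ hd
  unfold D_first_n_terms at hd
  subst hd
  decide
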